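-- pv_equiv track=rewrite | github.com/AlfonsoMartitegui/xercode-iot-back | mqtt_router/mqtt_router/adapters/native_topic_matcher.py | match_topic_pattern
-- ===== SOURCE A (Python) =====
-- def match_topic_pattern(
--     topic: str,
--     pattern: str,
--     native_path_mode: str | None = None,
-- ) -> dict[str, str] | None:
--     topic_parts = topic.split("/")
--     pattern_parts = pattern.split("/")
--     values: dict[str, str] = {}
--
--     topic_index = 0
--     for pattern_index, pattern_part in enumerate(pattern_parts):
--         if _is_placeholder(pattern_part):
--             placeholder = pattern_part[1:-1]
--             is_last_pattern_part = pattern_index == len(pattern_parts) - 1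
--             if native_path_mode == "rest" and placeholder == "native_path" and is_last_pattern_part:
--                 if topic_index >= len(topic_parts):
--                     return None
--                 values[placeholder] = "/".join(topic_parts[topic_index:])
--                 return values
--
--             if topic_index >= len(topic_parts):
--                 return None
--             values[placeholder] = topic_parts[topic_index]
--             topic_index += 1
--             continue
--
--         if topic_index >= len(topic_parts) or topic_parts[topic_index] != pattern_part:
--             return None
--         topic_index += 1
--
--     if topic_index != len(topic_parts):
--         return None
--
--     return values
--
-- def _is_placeholder(value: str) -> bool:
--     return value.startswith("{") and value.endswith("}") and len(value) > 2
-- ===== SOURCE B (Python) =====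
-- def match_topic_pattern(topic, pattern, native_path_mode=None):
--     topic_parts = topic.split("/")
--     pattern_parts = pattern.split("/")
--     rest = native_path_mode == "rest" and pattern_parts[-1] == "{native_path}"
--     head = pattern_parts[:-1] if rest else pattern_parts
--     if (len(topic_parts) < len(pattern_parts)) if rest else (len(topic_parts) != len(pattern_parts)):
--         return None
--     pairs = list(zip(head, topic_parts))
--     if any(p != t for p, t in pairs if not _is_ph(p)):
--         return None
--     values = {p[1:-1]: t for p, t in pairs if _is_ph(p)}
--     if rest:
--         values["native_path"] = "/".join(topic_parts[len(pattern_parts) - 1:])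
--     return values
--
-- def _is_ph(p):
--     return p.startswith("{") and p.endswith("}") and len(p) > 2
-- ===== Notes on version B (the rewrite author's own statement) =====
-- stated objective: alternative
-- what changed: A's single interleaved loop that walks the pattern with a separate topic_index, deciding per segment whether to capture, compare or take the rest, is replaced by a staged validate-then-extract scheme: rest-detection and one length guard up front, then one filtered pass over zipped (pattern, topic) pairs that only verifies the literal segments, then a dict comprehension over the same pairs that only captures the placeholders, with the rest tail appended last.
import Mathlib
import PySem

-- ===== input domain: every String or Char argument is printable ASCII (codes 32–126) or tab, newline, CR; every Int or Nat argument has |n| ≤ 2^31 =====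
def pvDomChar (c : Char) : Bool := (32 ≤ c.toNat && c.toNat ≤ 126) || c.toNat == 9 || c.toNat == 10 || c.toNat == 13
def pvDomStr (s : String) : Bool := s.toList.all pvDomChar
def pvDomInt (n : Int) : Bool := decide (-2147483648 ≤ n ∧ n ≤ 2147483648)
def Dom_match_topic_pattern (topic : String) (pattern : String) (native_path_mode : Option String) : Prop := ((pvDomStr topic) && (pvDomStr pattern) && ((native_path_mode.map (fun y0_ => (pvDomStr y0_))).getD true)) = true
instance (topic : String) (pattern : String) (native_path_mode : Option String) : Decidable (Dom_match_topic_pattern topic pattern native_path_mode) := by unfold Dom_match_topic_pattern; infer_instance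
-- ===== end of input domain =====

-- B replaces A's single interleaved index-tracking loop by a staged validate-then-extract scheme:
-- rest-detection and a length guard up front, a literal-verification pass over zipped pairs, then a
-- placeholder-capture comprehension over the same pairs (objective: alternative, same cost).

-- ===== PORT A =====
-- _is_placeholder(value)
def pvIsPlaceholder (v : String) : Bool :=
  PySem.Str.startswith v "{" && PySem.Str.endswith v "}" && decide (2 < PySem.Str.len v)

-- the for-loop of A over enumerate(pattern_parts), carrying topic_index and values
def pvLoopA (nmode : Option String) (tps : List String) (plen : Nat) :
    List (Int × String) → Nat → PySem.Dict String String → Option (List (String × String))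
  | [], ti, values => if ti ≠ tps.length then none else some values.items
  | (pi, pp) :: restEnum, ti, values =>
    if pvIsPlaceholder pp then
      let placeholder := PySem.Str.slice pp (some 1) (some (-1))
      let isLast : Bool := pi == (plen : Int) - 1
      if nmode == some "rest" && placeholder == "native_path" && isLast then
        if tps.length ≤ ti then none
        else some ((values.insert placeholder
          (PySem.Str.join "/" (PySem.List.slice tps (some (ti : Int)) none))).items)
      else
        if tps.length ≤ ti then none
        else pvLoopA nmode tps plen restEnum (ti + 1) (values.insert placeholder (tps.getD ti ""))
    else
      if tps.length ≤ ti || (tps.getD ti "" != pp) then none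
      else pvLoopA nmode tps plen restEnum (ti + 1) values

def match_topic_pattern (topic : String) (pattern : String) (native_path_mode : Option String) : Option (List (String × String)) :=
  -- topic.split("/") / pattern.split("/"): the separator is the nonempty literal "/", so split? is always some — getD [] is exact
  let tps := (PySem.Str.split? topic "/").getD []
  let pps := (PySem.Str.split? pattern "/").getD []
  pvLoopA native_path_mode tps pps.length (PySem.List.enumerate pps 0) 0 PySem.Dict.empty

-- ===== PORT B =====
-- _is_ph(p)
def pvIsPh (p : String) : Bool :=
  PySem.Str.startswith p "{" && PySem.Str.endswith p "}" && decide (2 < PySem.Str.len p)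

-- any(p != t for p, t in pairs if not _is_ph(p))
def pvBad : List (String × String) → Bool
  | [] => false
  | (p, t) :: rest => (!pvIsPh p && p != t) || pvBad rest

-- {p[1:-1]: t for p, t in pairs if _is_ph(p)}   (accumulator generalised for the proof)
def pvCapture : List (String × String) → PySem.Dict String String → PySem.Dict String String
  | [], v => v
  | (p, t) :: rest, v =>
    pvCapture rest (if pvIsPh p then v.insert (PySem.Str.slice p (some 1) (some (-1))) t else v)

def match_topic_pattern_alt (topic : String) (pattern : String) (native_path_mode : Option String) : Option (List (String × String)) :=
  let tps := (PySem.Str.split? topic "/").getD []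
  let pps := (PySem.Str.split? pattern "/").getD []
  -- pattern_parts[-1]: pps is a split result, hence nonempty, so pyGet? is always some — getD "" is exact
  let rest := native_path_mode == some "rest" && (PySem.List.pyGet? pps (-1)).getD "" == "{native_path}"
  let head := if rest then PySem.List.slice pps none (some (-1)) else pps
  if (if rest then tps.length < pps.length else tps.length ≠ pps.length) then none
  else
    let pairs := head.zip tps
    if pvBad pairs then none
    else
      let values := pvCapture pairs PySem.Dict.empty
      if rest then
        some ((values.insert "native_path"
          (PySem.Str.join "/" (PySem.List.slice tps (some ((pps.length : Int) - 1)) none))).items)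
      else some values.items

-- ===== PRECONDITION & SPEC =====
def Spec_match_topic_pattern (topic : String) (pattern : String) (native_path_mode : Option String) (out : Option (List (String × String))) : Prop := out = match_topic_pattern_alt topic pattern native_path_mode
instance (topic : String) (pattern : String) (native_path_mode : Option String) (out : Option (List (String × String))) : Decidable (Spec_match_topic_pattern topic pattern native_path_mode out) := by unfold Spec_match_topic_pattern; infer_instance

-- ===== CLAIM (what is proved, stated in full; the proofs are below) =====
def Claim_equal_match_topic_pattern : Prop := ∀ (topic : String) (pattern : String) (native_path_mode : Option String), Dom_match_topic_pattern topic pattern native_path_mode → Spec_match_topic_pattern topic pattern native_path_mode (match_topic_pattern topic pattern native_path_mode)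

-- ===== LEMMAS AND PROOFS =====

-- common recursive specification A's loop is reduced to
def pvS (nmode : Option String) : List String → List String → PySem.Dict String String → Option (List (String × String))
  | [], ts, v => if ts ≠ [] then none else some v.items
  | p :: ps, ts, v =>
    if pvIsPlaceholder p then
      if nmode == some "rest" && PySem.Str.slice p (some 1) (some (-1)) == "native_path" && ps.isEmpty then
        match ts with
        | [] => none
        | _ :: _ => some ((v.insert (PySem.Str.slice p (some 1) (some (-1)))
            (PySem.Str.join "/" ts)).items)
      else match ts with
        | [] => none
        | t :: ts' => pvS nmode ps ts' (v.insert (PySem.Str.slice p (some 1) (some (-1))) t)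
    else match ts with
      | [] => none
      | t :: ts' => if t != p then none else pvS nmode ps ts' v

-- a placeholder whose inner text is "native_path" is exactly the literal "{native_path}"
lemma pv_ph_native (p : String) (h : pvIsPlaceholder p = true) :
    (PySem.Str.slice p (some 1) (some (-1)) == "native_path") = (p == "{native_path}") := by
  simp only [pvIsPlaceholder, Bool.and_eq_true, decide_eq_true_eq,
    PySem.Str.startswith_eq, PySem.Str.endswith_eq, PySem.Str.len_eq] at h
  obtain ⟨⟨hpre, hsuf⟩, hlen⟩ := h
  rw [PySem.Chars.startswith_iff] at hpre
  rw [PySem.Chars.endswith_iff] at hsuf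
  obtain ⟨front, hfr⟩ := hsuf
  have hfrne : front ≠ [] := by
    rintro rfl
    rw [← hfr] at hlen; simp at hlen
  obtain ⟨c, mid, rfl⟩ := List.exists_cons_of_ne_nil hfrne
  have hc : c = '{' := by
    rcases hpre with ⟨tl, htl⟩
    rw [← hfr] at htl
    simpa using congrArg (·.head?) htl.symm
  subst hc
  have heq : (PySem.Str.slice p (some 1) (some (-1))).toList = mid := by
    rw [PySem.Str.toList_slice, PySem.Chars.slice_eq_listSlice, ← hfr]
    simp [PySem.List.slice, PySem.List.clampIdx]
    rw [if_neg (by omega)]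
    simp
  apply Bool.eq_iff_iff.mpr
  simp only [beq_iff_eq]
  constructor
  · intro hs
    apply String.toList_inj.mp
    rw [← hfr]
    have hmid : mid = "native_path".toList := by rw [← heq, hs]
    rw [hmid]
    decide
  · rintro rfl
    decide

-- A's loop equals pvS
lemma pvLoopA_eq_S (nmode : Option String) (tps : List String) (plen : Nat) :
    ∀ (ps : List String) (i : Nat) (v : PySem.Dict String String),
      i ≤ tps.length → i + ps.length = plen →
      pvLoopA nmode tps plen (PySem.List.enumerate ps (i : Int)) i v = pvS nmode ps (tps.drop i) v := by
  intro ps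
  induction ps with
  | nil =>
    intro i v hi hplen
    rw [show PySem.List.enumerate ([] : List String) (i : Int) = [] from rfl]
    by_cases h : i = tps.length
    · simp [pvLoopA, pvS, h]
    · simp [pvLoopA, pvS, h]
      omega
  | cons p ps ih =>
    intro i v hi hplen
    rw [PySem.List.enumerate_cons]
    simp only [List.length_cons] at hplen
    have hlast : (((i : Int)) == (plen : Int) - 1) = ps.isEmpty := by
      cases ps with
      | nil => simp at hplen ⊢; omega
      | cons q qs =>
        have hne : ¬ ((i : Int) = (plen : Int) - 1) := by
          simp only [List.length_cons] at hplen
          omega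
        simp [hne]
    cases hd : tps.drop i with
    | nil =>
      have hlen : tps.length ≤ i := by
        have := List.drop_eq_nil_iff.mp hd; omega
      cases hp : pvIsPlaceholder p
      · simp [pvLoopA, pvS, hp, hlen]
      · simp only [pvLoopA, pvS, hp, hlast]
        split <;> simp [hlen]
    | cons t ts' =>
      have hlt : i < tps.length := by
        have := congrArg List.length hd
        simp at this; omega
      have hget : tps.getD i "" = t := by
        rw [List.getD_eq_getElem?_getD, ← List.head?_drop, hd]; rfl
      have hdrop : tps.drop (i + 1) = ts' := by
        have h1 : (tps.drop i).drop 1 = tps.drop (i + 1) := by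
          rw [List.drop_drop]
        rw [← h1, hd]; rfl
      have hi' : i + 1 ≤ tps.length := hlt
      have hcast : ((i : Int) + 1) = (((i + 1 : Nat)) : Int) := by push_cast; ring
      have hle : decide (tps.length ≤ i) = false := decide_eq_false (by omega)
      cases hp : pvIsPlaceholder p
      · simp only [pvLoopA, pvS, hp, Bool.false_eq_true, if_false, hget]
        by_cases hne : t = p
        · subst hne
          simp only [bne_self_eq_false, Bool.or_false, hle, Bool.false_eq_true, if_false, hcast]
          rw [ih (i + 1) v hi' (by omega), hdrop]
        · have : (t != p) = true := bne_iff_ne.mpr hne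
          simp [this, hle]
      · simp only [pvLoopA, pvS, hp, if_true, hlast]
        by_cases hcond : (nmode == some "rest" && (PySem.Str.slice p (some 1) (some (-1)) == "native_path") && ps.isEmpty) = true
        · rw [if_pos hcond, if_pos hcond, if_neg (by omega)]
          rw [PySem.List.slice_from_natCast, hd]
        · rw [if_neg hcond, if_neg hcond, if_neg (by omega), hget, hcast]
          rw [ih (i + 1) _ hi' (by omega), hdrop]

-- the two placeholder predicates coincide
lemma pv_ph_eq (p : String) : pvIsPh p = pvIsPlaceholder p := rfl

-- B's staged passes equal pvS in the non-rest case
lemma pvS_norest (nmode : Option String) :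
    ∀ (ps ts : List String) (v : PySem.Dict String String),
      (nmode ≠ some "rest" ∨ ps.getLast? ≠ some "{native_path}") →
      pvS nmode ps ts v =
        (if ts.length ≠ ps.length then none
         else if pvBad (ps.zip ts) then none
         else some ((pvCapture (ps.zip ts) v).items)) := by
  intro ps
  induction ps with
  | nil =>
    intro ts v _
    cases ts <;> simp [pvS, pvBad, pvCapture]
  | cons p ps ih =>
    intro ts v hc
    have hc' : nmode ≠ some "rest" ∨ ps.getLast? ≠ some "{native_path}" := by
      cases ps with
      | nil => right; simp
      | cons q qs =>
        rcases hc with h | h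
        · exact Or.inl h
        · right; rwa [List.getLast?_cons_cons] at h
    cases ts with
    | nil =>
      cases hb : pvIsPlaceholder p
      · simp [pvS, hb]
      · simp only [pvS, hb, if_true]
        split <;> simp
    | cons t ts' =>
      cases hb : pvIsPlaceholder p
      · by_cases hne : p = t
        · subst hne
          simp [pvS, pvBad, pvCapture, pv_ph_eq, hb, ih _ _ hc']
        · have h1 : (t != p) = true := bne_iff_ne.mpr (Ne.symm hne)
          have h2 : (p != t) = true := bne_iff_ne.mpr hne
          simp [pvS, pvBad, pv_ph_eq, hb, h1, h2]
      · have hcond : ¬ ((nmode = some "rest" ∧ PySem.Str.slice p (some 1) (some (-1)) = "native_path") ∧ ps = []) := by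
          rintro ⟨⟨hm, hs⟩, hps⟩
          have : (p == "{native_path}") = true := by
            rw [← pv_ph_native p hb]; exact beq_iff_eq.mpr hs
          have hp : p = "{native_path}" := beq_iff_eq.mp this
          subst hps hm hp
          rcases hc with h | h
          · exact h rfl
          · simp at h
        simp [pvS, pvBad, pvCapture, pv_ph_eq, hb, hcond, ih _ _ hc']

-- B's staged passes equal pvS in the rest case (mode "rest", pattern ends in "{native_path}")
lemma pvS_rest (ps' : List String) :
    ∀ (ts : List String) (v : PySem.Dict String String),
      pvS (some "rest") (ps' ++ ["{native_path}"]) ts v =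
        (if ts.length < ps'.length + 1 then none
         else if pvBad (ps'.zip ts) then none
         else some (((pvCapture (ps'.zip ts) v).insert "native_path"
             (PySem.Str.join "/" (ts.drop ps'.length))).items)) := by
  have h1 : pvIsPlaceholder "{native_path}" = true := by decide
  have h2 : PySem.Str.slice "{native_path}" (some 1) (some (-1)) = "native_path" := by decide
  induction ps' with
  | nil =>
    intro ts v
    cases ts with
    | nil => simp [pvS]
    | cons t ts' => simp [pvS, pvBad, pvCapture, h1, h2]
  | cons p ps ih =>
    intro ts v
    cases ts with
    | nil =>
      cases hb : pvIsPlaceholder p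
      · simp [pvS, List.cons_append, hb]
      · simp only [pvS, List.cons_append, hb, if_true]
        split <;> simp
    | cons t ts' =>
      cases hb : pvIsPlaceholder p
      · by_cases hne : p = t
        · subst hne
          simp [pvS, pvBad, pvCapture, pv_ph_eq, List.cons_append, hb, ih]
        · have ha : (t != p) = true := bne_iff_ne.mpr (Ne.symm hne)
          have hbb : (p != t) = true := bne_iff_ne.mpr hne
          simp [pvS, pvBad, pv_ph_eq, List.cons_append, hb, ha, hbb]
      · have hni : ((ps ++ ["{native_path}"]).isEmpty) = false := by simp
        simp [pvS, pvBad, pvCapture, pv_ph_eq, List.cons_append, hb, hni, ih]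

-- xs[-1] of a nonempty list is its last element
lemma pv_pyGet_neg_one (xs : List String) (h : xs ≠ []) :
    PySem.List.pyGet? xs (-1) = xs.getLast? := by
  simp only [PySem.List.pyGet?, PySem.List.pyIdx?]
  have hx : 0 < xs.length := List.length_pos_iff.mpr h
  rw [if_neg (by omega), if_pos (by omega)]
  simp only [Option.bind_some]
  rw [List.getLast?_eq_getElem?]
  norm_num

-- ===== VERDICT (by name: the statement is the Claim_ definition above) =====
theorem match_topic_pattern_spec : Claim_equal_match_topic_pattern := by
  unfold Claim_equal_match_topic_pattern
  intro topic pattern nmode _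
  unfold Spec_match_topic_pattern match_topic_pattern match_topic_pattern_alt
  generalize (PySem.Str.split? topic "/").getD [] = tps
  generalize (PySem.Str.split? pattern "/").getD [] = pps
  have hA := pvLoopA_eq_S nmode tps pps.length pps 0 PySem.Dict.empty (by omega) (by omega)
  norm_num at hA
  rw [hA]
  by_cases hr : nmode = some "rest" ∧ pps.getLast? = some "{native_path}"
  · obtain ⟨hm, hl⟩ := hr
    obtain ⟨ps', rfl⟩ := List.getLast?_eq_some_iff.mp hl
    subst hm
    have hflag : ((some "rest" : Option String) == some "rest" &&
        (PySem.List.pyGet? (ps' ++ ["{native_path}"]) (-1)).getD "" == "{native_path}") = true := by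
      rw [pv_pyGet_neg_one _ (by simp), hl]
      simp
    simp only [hflag, if_true]
    rw [PySem.List.slice_to_neg_one, List.dropLast_concat]
    have hlen : (ps' ++ ["{native_path}"]).length = ps'.length + 1 := by simp
    rw [hlen]
    have hcast : ((ps'.length + 1 : Nat) : Int) - 1 = ((ps'.length : Nat) : Int) := by push_cast; ring
    rw [hcast, PySem.List.slice_from_natCast]
    rw [pvS_rest ps' tps PySem.Dict.empty]
  · have hflag : (nmode == some "rest" &&
        (PySem.List.pyGet? pps (-1)).getD "" == "{native_path}") = false := by
      cases hpp : pps with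
      | nil => simp [PySem.List.pyGet?]
      | cons q qs =>
        rw [pv_pyGet_neg_one _ (by simp)]
        rw [not_and_or] at hr
        rcases hr with h | h
        · simp [h]
        · rw [hpp] at h
          cases hgl : (q :: qs).getLast? with
          | none =>
            have := List.getLast?_isSome (l := q :: qs)
            rw [hgl] at this; simp at this
          | some x =>
            rw [hgl] at h
            simp only [Option.getD_some, Bool.and_eq_false_iff]
            right
            simp only [beq_eq_false_iff_ne, ne_eq]
            intro hq
            exact h (by rw [hq])
    simp only [hflag, Bool.false_eq_true, if_false]
    rw [not_and_or] at hr
    rw [pvS_norest nmode pps tps PySem.Dict.empty hr]
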